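-- pv_equiv track=rewrite | github.com/Andywang201605/craco_commissioning | inspect_script/derive_SEFD.py | get_crosspair_index
-- ===== SOURCE A (Python) =====
-- def get_crosspair_index(nant):
--     idx = 0
--     crossidx = []
--     for ant1 in range(nant):
--         for ant2 in range(ant1, nant):
--             if ant1 != ant2: crossidx.append(idx)
--             idx += 1
--     return crossidx
-- ===== SOURCE B (Python) =====
-- def get_crosspair_index(nant):
--     if nant <= 0:
--         return []
--     total = nant * (nant + 1) // 2
--     diag = {k * nant - k * (k - 1) // 2 for k in range(nant)}
--     return [i for i in range(total) if i not in diag]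
-- ===== Notes on version B (the rewrite author's own statement) =====
-- stated objective: alternative
-- what changed: Replaces the nested row/column loop with a per-element branch by a closed-form count of upper-triangular entries plus a precomputed set of diagonal positions, filtered out in one flat pass over range(total).
import Mathlib
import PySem

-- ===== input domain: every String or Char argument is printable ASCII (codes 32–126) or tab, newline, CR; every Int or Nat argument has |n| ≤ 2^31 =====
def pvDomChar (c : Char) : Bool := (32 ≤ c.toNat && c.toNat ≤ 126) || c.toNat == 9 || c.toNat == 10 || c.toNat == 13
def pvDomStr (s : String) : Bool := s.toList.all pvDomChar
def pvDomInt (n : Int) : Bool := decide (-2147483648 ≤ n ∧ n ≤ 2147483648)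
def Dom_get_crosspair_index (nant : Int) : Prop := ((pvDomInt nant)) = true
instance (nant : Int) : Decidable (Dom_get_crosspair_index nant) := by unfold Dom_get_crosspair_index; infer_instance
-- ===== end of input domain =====

-- B replaces A's nested loops (per-element diagonal test) by a closed-form total
-- plus a precomputed set of diagonal positions filtered out of one flat range
-- (alternative decomposition, same asymptotic cost).

-- ===== PORT A =====
def get_crosspair_index (nant : Int) : List Int :=
  ((PySem.List.pyRange 0 nant 1).foldl (fun (st : Int × List Int) ant1 =>
      (PySem.List.pyRange ant1 nant 1).foldl (fun (st : Int × List Int) ant2 =>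
        (st.1 + 1, if ant1 ≠ ant2 then st.2 ++ [st.1] else st.2)) st)
    (0, [])).2

-- ===== PORT B =====
def get_crosspair_index_alt (nant : Int) : List Int :=
  if nant ≤ 0 then []
  else
    let total := PySem.Int.floordiv (nant * (nant + 1)) 2
    let diag : PySem.Set Int :=
      PySem.Set.ofList ((PySem.List.pyRange 0 nant 1).map
        (fun k => k * nant - PySem.Int.floordiv (k * (k - 1)) 2))
    (PySem.List.pyRange 0 total 1).filter (fun i => ¬ PySem.Set.contains diag i)

-- ===== PRECONDITION & SPEC =====
def Spec_get_crosspair_index (nant : Int) (out : List Int) : Prop := out = get_crosspair_index_alt nant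
instance (nant : Int) (out : List Int) : Decidable (Spec_get_crosspair_index nant out) := by unfold Spec_get_crosspair_index; infer_instance

-- ===== CLAIM (what is proved, stated in full; the proofs are below) =====
def Claim_equal_get_crosspair_index : Prop := ∀ (nant : Int), Dom_get_crosspair_index nant → Spec_get_crosspair_index nant (get_crosspair_index nant)

-- ===== LEMMAS AND PROOFS =====

-- diagonal position of row k in the flattened upper triangle
def pvDiag (n k : Int) : Int := k * n - PySem.Int.floordiv (k * (k - 1)) 2

lemma pvHalf (x : Int) (h : Even x) : PySem.Int.floordiv x 2 * 2 = x := by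
  have hm : PySem.Int.mod x 2 = 0 := (PySem.Int.mod_eq_zero_iff_dvd _ _).mpr h.two_dvd
  have he := PySem.Int.floordiv_mul_add_mod x 2
  omega

lemma pvDiag_step (n k : Int) : pvDiag n (k + 1) = pvDiag n k + (n - k) := by
  unfold pvDiag
  have e1 := pvHalf (k * (k - 1)) (by simpa [mul_comm] using Int.even_mul_succ_self (k - 1))
  have e2 := pvHalf ((k + 1) * ((k + 1) - 1)) (by simpa [mul_comm] using Int.even_mul_succ_self k)
  have hq : PySem.Int.floordiv ((k + 1) * ((k + 1) - 1)) 2 * 2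
      = PySem.Int.floordiv (k * (k - 1)) 2 * 2 + 2 * k := by linear_combination e2 - e1
  have hq' : PySem.Int.floordiv ((k + 1) * ((k + 1) - 1)) 2
      = PySem.Int.floordiv (k * (k - 1)) 2 + k := by omega
  linear_combination -hq'

lemma pvDiag_zero (n : Int) : pvDiag n 0 = 0 := by
  unfold pvDiag
  have e := pvHalf ((0 : Int) * (0 - 1)) (by decide)
  omega

lemma pvTotal_eq (n : Int) : PySem.Int.floordiv (n * (n + 1)) 2 = pvDiag n n := by
  unfold pvDiag
  have e1 := pvHalf (n * (n + 1)) (Int.even_mul_succ_self n)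
  have e2 := pvHalf (n * (n - 1)) (by simpa [mul_comm] using Int.even_mul_succ_self (n - 1))
  have hq : PySem.Int.floordiv (n * (n + 1)) 2 * 2 + PySem.Int.floordiv (n * (n - 1)) 2 * 2
      = 2 * (n * n) := by linear_combination e1 + e2
  have hq' : PySem.Int.floordiv (n * (n + 1)) 2
      = n * n - PySem.Int.floordiv (n * (n - 1)) 2 := by omega
  linear_combination hq' 

-- strict monotonicity of pvDiag on [0, n]
lemma pvDiag_strictMono (n : Int) : ∀ (t : Nat) (j k : Int), j < k → k ≤ n → k - j ≤ (t : Int) →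
    pvDiag n j < pvDiag n k := by
  intro t
  induction t with
  | zero => intro j k h1 _ h3; omega
  | succ m ih =>
    intro j k h1 h2 h3
    rcases eq_or_lt_of_le (Int.add_one_le_iff.mpr h1) with he | hl
    · have : k = j + 1 := by omega
      subst this
      rw [pvDiag_step]; omega
    · have hk : k - 1 ≤ n := by omega
      have := ih j (k - 1) (by omega) hk (by omega)
      have hs : pvDiag n ((k - 1) + 1) = pvDiag n (k - 1) + (n - (k - 1)) := pvDiag_step n (k - 1)
      have : pvDiag n (k - 1) < pvDiag n k := by
        have hk' : (k - 1) + 1 = k := by ring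
        rw [hk'] at hs; omega
      omega

lemma pvDiag_lt (n j k : Int) (h1 : j < k) (h2 : k ≤ n) : pvDiag n j < pvDiag n k :=
  pvDiag_strictMono n (k - j).toNat j k h1 h2 (by omega)

lemma pvDiag_mono (n j k : Int) (h1 : j ≤ k) (h2 : k ≤ n) : pvDiag n j ≤ pvDiag n k := by
  rcases eq_or_lt_of_le h1 with h | h
  · rw [h]
  · exact le_of_lt (pvDiag_lt n j k h h2)

-- the inner loop, after its first (skipped) iteration: all ant2 in range(a,b) differ from k
lemma pvInnerTail : ∀ (t : Nat) (k a b s : Int) (acc : List Int), k < a → b - a ≤ (t : Int) →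
    (PySem.List.pyRange a b 1).foldl
      (fun (st : Int × List Int) ant2 => (st.1 + 1, if k ≠ ant2 then st.2 ++ [st.1] else st.2))
      (s, acc)
    = (s + max (b - a) 0, acc ++ PySem.List.pyRange s (s + max (b - a) 0) 1) := by
  intro t
  induction t with
  | zero =>
    intro k a b s acc h1 h2
    have hm : max (b - a) 0 = 0 := by omega
    rw [PySem.List.pyRange_one_eq_nil (by omega), hm]
    simp
  | succ m ih =>
    intro k a b s acc h1 h2
    by_cases hab : b ≤ a
    · have hm : max (b - a) 0 = 0 := by omega
      rw [PySem.List.pyRange_one_eq_nil hab, hm]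
      simp
    · rw [not_le] at hab
      rw [PySem.List.pyRange_one_cons hab]
      simp only [List.foldl_cons]
      rw [if_pos (by omega)]
      rw [ih k (a + 1) b (s + 1) (acc ++ [s]) (by omega) (by omega)]
      have hm1 : max (b - (a + 1)) 0 = b - a - 1 := by omega
      have hm2 : max (b - a) 0 = b - a := by omega
      rw [hm1, hm2]
      have h3 : s + 1 + (b - a - 1) = s + (b - a) := by ring
      rw [h3, PySem.List.pyRange_one_cons (show s < s + (b - a) by omega)]
      simp

-- one full row: ant1 = k, ant2 from k to b, starting at index s
lemma pvRow (k b s : Int) (acc : List Int) (h : k < b) :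
    (PySem.List.pyRange k b 1).foldl
      (fun (st : Int × List Int) ant2 => (st.1 + 1, if k ≠ ant2 then st.2 ++ [st.1] else st.2))
      (s, acc)
    = (s + (b - k), acc ++ PySem.List.pyRange (s + 1) (s + (b - k)) 1) := by
  rw [PySem.List.pyRange_one_cons h]
  simp only [List.foldl_cons]
  rw [if_neg (show ¬ (k ≠ k) by simp)]
  rw [pvInnerTail (b - (k + 1)).toNat k (k + 1) b (s + 1) acc (by omega) (by omega)]
  have hm : max (b - (k + 1)) 0 = b - k - 1 := by omega
  rw [hm]
  have h3 : s + 1 + (b - k - 1) = s + (b - k) := by ring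
  rw [h3]

-- the outer loop starting at row a with running index pvDiag n a
lemma pvOuter : ∀ (t : Nat) (n a : Int) (acc : List Int), n - a ≤ (t : Int) →
    ∃ s', (PySem.List.pyRange a n 1).foldl
        (fun (st : Int × List Int) ant1 =>
          (PySem.List.pyRange ant1 n 1).foldl
            (fun (st : Int × List Int) ant2 => (st.1 + 1, if ant1 ≠ ant2 then st.2 ++ [st.1] else st.2)) st)
        (pvDiag n a, acc)
      = (s', acc ++ (PySem.List.pyRange a n 1).flatMap
          (fun k => PySem.List.pyRange (pvDiag n k + 1) (pvDiag n (k + 1)) 1)) := by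
  intro t
  induction t with
  | zero =>
    intro n a acc h
    rw [PySem.List.pyRange_one_eq_nil (by omega)]
    refine ⟨pvDiag n a, ?_⟩
    simp
  | succ m ih =>
    intro n a acc h
    by_cases han : n ≤ a
    · rw [PySem.List.pyRange_one_eq_nil han]
      refine ⟨pvDiag n a, ?_⟩
      simp
    · rw [not_le] at han
      rw [PySem.List.pyRange_one_cons han]
      simp only [List.foldl_cons]
      rw [pvRow a n (pvDiag n a) acc han]
      have hs : pvDiag n a + (n - a) = pvDiag n (a + 1) := by
        rw [pvDiag_step]
      rw [hs]
      obtain ⟨s', hrec⟩ := ih n (a + 1)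
        (acc ++ PySem.List.pyRange (pvDiag n a + 1) (pvDiag n (a + 1)) 1) (by omega)
      refine ⟨s', ?_⟩
      rw [hrec, List.flatMap_cons, List.append_assoc]

-- membership in the diagonal set
lemma pvMem_diag (n i : Int) :
    (i ∈ (PySem.List.pyRange 0 n 1).map (fun k => k * n - PySem.Int.floordiv (k * (k - 1)) 2))
    ↔ ∃ k, 0 ≤ k ∧ k < n ∧ i = pvDiag n k := by
  simp only [List.mem_map, PySem.List.mem_pyRange_one]
  constructor
  · rintro ⟨k, ⟨hk0, hkn⟩, he⟩; exact ⟨k, hk0, hkn, he.symm⟩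
  · rintro ⟨k, hk0, hkn, he⟩; exact ⟨k, ⟨hk0, hkn⟩, he.symm⟩

-- B's flat filtered range, restricted to rows a..n, equals the flatMap of rows
lemma pvBside (n : Int) (hn : 0 < n) :
    ∀ (t : Nat) (a : Int), 0 ≤ a → a ≤ n → n - a ≤ (t : Int) →
    (PySem.List.pyRange (pvDiag n a) (pvDiag n n) 1).filter
      (fun i => ¬ PySem.Set.contains
        (PySem.Set.ofList ((PySem.List.pyRange 0 n 1).map
          (fun k => k * n - PySem.Int.floordiv (k * (k - 1)) 2))) i)
    = (PySem.List.pyRange a n 1).flatMap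
        (fun k => PySem.List.pyRange (pvDiag n k + 1) (pvDiag n (k + 1)) 1) := by
  intro t
  induction t with
  | zero =>
    intro a h0 h1 h2
    have : a = n := by omega
    subst this
    rw [PySem.List.pyRange_one_eq_nil (le_refl _), PySem.List.pyRange_one_eq_nil (le_refl _)]
    simp
  | succ m ih =>
    intro a h0 h1 h2
    by_cases han : n ≤ a
    · have : a = n := by omega
      subst this
      rw [PySem.List.pyRange_one_eq_nil (le_refl _), PySem.List.pyRange_one_eq_nil (le_refl _)]
      simp
    · rw [not_le] at han
      have hstep : pvDiag n a < pvDiag n (a + 1) := pvDiag_lt n a (a + 1) (by omega) (by omega)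
      have hend : pvDiag n (a + 1) ≤ pvDiag n n := pvDiag_mono n (a + 1) n (by omega) (le_refl _)
      rw [PySem.List.pyRange_one_append (pvDiag n a) (pvDiag n (a + 1)) (pvDiag n n)
        (le_of_lt hstep) hend]
      rw [List.filter_append]
      rw [PySem.List.pyRange_one_cons han, List.flatMap_cons]
      congr 1
      · -- first block: the head pvDiag n a is filtered out, the rest stays
        rw [PySem.List.pyRange_one_cons hstep]
        rw [List.filter_cons]
        have hmem : pvDiag n a ∈ (PySem.List.pyRange 0 n 1).map
            (fun k => k * n - PySem.Int.floordiv (k * (k - 1)) 2) :=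
          (pvMem_diag n _).mpr ⟨a, h0, han, rfl⟩
        have hcon : PySem.Set.contains
            (PySem.Set.ofList ((PySem.List.pyRange 0 n 1).map
              (fun k => k * n - PySem.Int.floordiv (k * (k - 1)) 2))) (pvDiag n a) = true :=
          (PySem.Set.contains_iff _ _).mpr ((PySem.Set.mem_ofList _ _).mpr hmem)
        rw [if_neg (by simp only [decide_eq_true_eq]; exact not_not_intro hcon)]
        apply List.filter_eq_self.mpr
        intro x hx
        rw [PySem.List.mem_pyRange_one] at hx
        simp only [decide_eq_true_eq]
        intro hcx
        have hx' := (PySem.Set.mem_ofList _ _).mp ((PySem.Set.contains_iff _ _).mp hcx)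
        obtain ⟨k, hk0, hkn, he⟩ := (pvMem_diag n x).mp hx'
        subst he
        by_cases hka : k ≤ a
        · have := pvDiag_mono n k a hka (le_of_lt han)
          omega
        · have := pvDiag_mono n (a + 1) k (by omega) (by omega)
          omega
      · exact ih (a + 1) (by omega) (by omega) (by omega)

lemma pvBside0 (n : Int) (hn : 0 < n) :
    (PySem.List.pyRange 0 (pvDiag n n) 1).filter
      (fun i => ¬ PySem.Set.contains
        (PySem.Set.ofList ((PySem.List.pyRange 0 n 1).map
          (fun k => k * n - PySem.Int.floordiv (k * (k - 1)) 2))) i)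
    = (PySem.List.pyRange 0 n 1).flatMap
        (fun k => PySem.List.pyRange (pvDiag n k + 1) (pvDiag n (k + 1)) 1) := by
  have h := pvBside n hn n.toNat 0 (le_refl _) (by omega) (by omega)
  rwa [pvDiag_zero] at h

-- ===== VERDICT (by name: the statement is the Claim_ definition above) =====
theorem get_crosspair_index_spec : Claim_equal_get_crosspair_index := by
  intro nant _
  unfold Spec_get_crosspair_index get_crosspair_index get_crosspair_index_alt
  by_cases hn : nant ≤ 0
  · rw [if_pos hn, PySem.List.pyRange_one_eq_nil hn]
    simp
  · rw [not_le] at hn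
    rw [if_neg (by omega)]
    obtain ⟨s', hA⟩ := pvOuter nant.toNat nant 0 [] (by omega)
    rw [pvDiag_zero] at hA
    rw [hA]
    simp only [List.nil_append]
    rw [pvTotal_eq]
    exact (pvBside0 nant hn).symm
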